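-- pv_equiv track=rewrite | github.com/Praveen181989/INEURON_PYTHON_ASSIGNMENTS | Ineuron_Python_Assignment_11.py | duplicate_characters
-- ===== SOURCE A (Python) =====
-- def duplicate_characters(string):
--     chars = {}
--     for char in string:
--         if char not in chars:
--             chars[char] = 1
--         else:
--             chars[char] += 1
--
--     duplicates = []
--
--     for char, count in chars.items():
--         if count > 1:
--             duplicates.append(char)
--     return duplicates
-- ===== SOURCE B (Python) =====
-- def duplicate_characters(string):
--     seen = set()
--     dup = set()
--     for ch in string:
--         if ch in seen:
--             dup.add(ch)
--         else:
--             seen.add(ch)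
--     result = []
--     emitted = set()
--     for ch in string:
--         if ch in dup and ch not in emitted:
--             result.append(ch)
--             emitted.add(ch)
--     return result
-- ===== Notes on version B (the rewrite author's own statement) =====
-- stated objective: alternative
-- what changed: Replaced the frequency dict plus dict-items scan with two membership sets (seen/dup) built in one pass and a re-scan of the original string that emits each duplicated char at its first occurrence.
import Mathlib
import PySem

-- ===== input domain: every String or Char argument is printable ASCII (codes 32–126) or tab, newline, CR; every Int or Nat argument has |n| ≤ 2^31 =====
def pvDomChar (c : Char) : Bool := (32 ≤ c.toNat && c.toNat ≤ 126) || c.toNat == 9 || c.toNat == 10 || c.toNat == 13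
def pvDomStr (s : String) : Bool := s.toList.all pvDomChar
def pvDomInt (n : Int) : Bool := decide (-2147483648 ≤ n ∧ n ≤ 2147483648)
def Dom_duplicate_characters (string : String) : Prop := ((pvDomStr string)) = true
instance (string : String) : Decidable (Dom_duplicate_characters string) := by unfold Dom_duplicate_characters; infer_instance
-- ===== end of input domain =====

-- B replaces A's frequency dict and dict-items scan with two membership sets built in one pass
-- plus a re-scan of the original string (objective: alternative decomposition, same cost).

-- ===== PORT A =====
-- A: count every char in a dict, then collect (in dict insertion order = first-appearance
-- order) the chars whose count exceeds 1.
def duplicate_characters (string : String) : List String :=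
  let chars := string.toList.foldl
    (fun (d : PySem.Dict Char Int) char =>
      if ¬ d.contains char then d.insert char 1 else d.insert char (d.getD char 0 + 1))
    PySem.Dict.empty
  chars.items.foldl
    (fun duplicates (p : Char × Int) => if p.2 > 1 then duplicates ++ [p.1.toString] else duplicates)
    []

-- ===== PORT B =====
-- B: one pass maintaining `seen`/`dup` sets (no counts), then a re-scan of the string that
-- emits each char of `dup` at its first occurrence, tracking emitted chars in a set.
def duplicate_characters_alt (string : String) : List String :=
  let sd := string.toList.foldl
    (fun (sd : PySem.Set Char × PySem.Set Char) ch =>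
      if PySem.Set.contains sd.1 ch then (sd.1, PySem.Set.add sd.2 ch)
      else (PySem.Set.add sd.1 ch, sd.2))
    (PySem.Set.empty, PySem.Set.empty)
  (string.toList.foldl
    (fun (re : List String × PySem.Set Char) ch =>
      if PySem.Set.contains sd.2 ch && !(PySem.Set.contains re.2 ch) then
        (re.1 ++ [ch.toString], PySem.Set.add re.2 ch)
      else re)
    ([], PySem.Set.empty)).1

-- ===== PRECONDITION & SPEC =====
def Spec_duplicate_characters (string : String) (out : List String) : Prop := out = duplicate_characters_alt string
instance (string : String) (out : List String) : Decidable (Spec_duplicate_characters string out) := by unfold Spec_duplicate_characters; infer_instance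

-- ===== CLAIM (what is proved, stated in full; the proofs are below) =====
def Claim_equal_duplicate_characters : Prop := ∀ (string : String), Dom_duplicate_characters string → Spec_duplicate_characters string (duplicate_characters string)

-- ===== LEMMAS AND PROOFS =====

-- A's counting loop body (with its not-in/else branches) is exactly Counter's step.
theorem countLoop_eq_counter (l : List Char) :
    l.foldl (fun (d : PySem.Dict Char Int) char =>
        if ¬ d.contains char then d.insert char 1 else d.insert char (d.getD char 0 + 1))
      PySem.Dict.empty
    = PySem.Dict.counter l := by
  rw [← PySem.Dict.foldl_insert_getD_add_one_eq_counter]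
  congr 1
  funext d c
  by_cases h : d.contains c
  · simp [h]
  · simp only [Bool.not_eq_true] at h
    simp [h, PySem.Dict.getD_of_not_contains d 0 h]

-- B's first loop: a char is in the `dup` component iff it occurs at least twice
-- (generalized over the running `seen`/`dup` state).
theorem phase1_mem (l : List Char) : ∀ (s d : PySem.Set Char) (x : Char), d.Nodup → s.Nodup →
    (x ∈ (l.foldl (fun (sd : PySem.Set Char × PySem.Set Char) ch =>
        if PySem.Set.contains sd.1 ch then (sd.1, PySem.Set.add sd.2 ch)
        else (PySem.Set.add sd.1 ch, sd.2)) (s, d)).2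
      ↔ x ∈ d ∨ (x ∈ s ∧ x ∈ l) ∨ 2 ≤ l.count x) := by
  induction l with
  | nil => intro s d x _ _; simp
  | cons c rest ih =>
    intro s d x hd hs
    by_cases h : PySem.Set.contains s c
    · have hcs : c ∈ s := (PySem.Set.contains_iff s c).mp h
      rw [List.foldl_cons]
      simp only [h, if_true]
      rw [ih s (PySem.Set.add d c) x (PySem.Set.nodup_add d c hd) hs]
      rw [PySem.Set.mem_add]
      by_cases hx : x = c
      · subst hx
        simp [hcs, List.mem_cons]
      · have hx' : c ≠ x := fun hh => hx hh.symm
        simp [hx, hx', List.mem_cons]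
    · have hcs : c ∉ s := fun hm => h ((PySem.Set.contains_iff s c).mpr hm)
      rw [List.foldl_cons]
      simp only [h, Bool.false_eq_true, if_false]
      rw [ih (PySem.Set.add s c) d x hd (PySem.Set.nodup_add s c hs)]
      by_cases hx : x = c
      · subst hx
        by_cases hxd : x ∈ d
        · simp [hxd]
        · simp [hcs, List.mem_cons, hxd]
          exact fun h2 => List.count_pos_iff.mp (by omega)
      · have hx' : c ≠ x := fun hh => hx hh.symm
        simp [hx, hx', PySem.Set.mem_add, List.mem_cons]
    -- Note on the positive x = c case above: both sides reduce to membership facts since a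
    -- second occurrence of c is witnessed by c ∈ s.

-- B's second loop: the emitted list is the dedup (first occurrences) of l filtered by
-- membership in `dup` and non-membership in the starting `emitted` set.
theorem phase2_fst (dup : PySem.Set Char) (l : List Char) : ∀ (res : List String) (em : PySem.Set Char),
    (l.foldl (fun (re : List String × PySem.Set Char) ch =>
        if PySem.Set.contains dup ch && !(PySem.Set.contains re.2 ch) then
          (re.1 ++ [ch.toString], PySem.Set.add re.2 ch)
        else re) (res, em)).1
      = res ++ ((PySem.List.dedup l).filter
          (fun c => PySem.Set.contains dup c && !(PySem.Set.contains em c))).map (fun c => c.toString) := by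
  induction l with
  | nil => intro res em; simp [PySem.List.dedup]
  | cons c rest ih =>
    intro res em
    have hded : PySem.List.dedup (c :: rest) = c :: (PySem.Set.ofList rest).discard c := by
      simp [PySem.Set.ofList_cons]
    have hdisc : ((PySem.Set.ofList rest).discard c) = (PySem.Set.ofList rest).filter (fun y => !(y == c)) := by
      simp [PySem.Set.discard]
    have hdedup : PySem.List.dedup rest = PySem.Set.ofList rest := by simp
    rw [List.foldl_cons]
    by_cases h : (PySem.Set.contains dup c && !(PySem.Set.contains em c)) = true
    · simp only [h, if_true]
      rw [ih, hded]
      simp only [List.filter_cons, h, if_true]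
      rw [hdisc, List.filter_filter, hdedup]
      have hp : ∀ x ∈ PySem.Set.ofList rest,
          (PySem.Set.contains dup x && !(PySem.Set.contains (PySem.Set.add em c) x))
          = ((PySem.Set.contains dup x && !(PySem.Set.contains em x)) && !(x == c)) := by
        intro x _
        have h1 : PySem.Set.contains (PySem.Set.add em c) x = (PySem.Set.contains em x || x == c) := by
          apply Bool.eq_iff_iff.mpr
          rw [PySem.Set.contains_iff, PySem.Set.mem_add, Bool.or_eq_true, PySem.Set.contains_iff, beq_iff_eq]
        rw [h1]
        cases PySem.Set.contains dup x <;> cases PySem.Set.contains em x <;> cases (x == c) <;> rfl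
      rw [List.filter_congr hp, List.append_assoc, List.singleton_append, List.map_cons]
    · simp only [h, Bool.false_eq_true, if_false]
      rw [ih, hded]
      have h' : (PySem.Set.contains dup c && !(PySem.Set.contains em c)) = false :=
        Bool.eq_false_iff.mpr h
      simp only [List.filter_cons, h', Bool.false_eq_true, if_false]
      rw [hdisc, List.filter_filter, hdedup]
      have hp : ∀ x ∈ PySem.Set.ofList rest,
          (PySem.Set.contains dup x && !(PySem.Set.contains em x))
          = ((PySem.Set.contains dup x && !(PySem.Set.contains em x)) && !(x == c)) := by
        intro x _
        by_cases hx : x = c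
        · subst hx; rw [h']; rfl
        · have hxc : (x == c) = false := beq_eq_false_iff_ne.mpr hx
          rw [hxc]
          cases PySem.Set.contains dup x <;> cases PySem.Set.contains em x <;> rfl
      rw [List.filter_congr hp]

-- ===== VERDICT (by name: the statement is the Claim_ definition above) =====
theorem duplicate_characters_spec : Claim_equal_duplicate_characters := by
  intro string _
  unfold Spec_duplicate_characters duplicate_characters duplicate_characters_alt
  set l := string.toList with hl
  -- A side: counter, items, filter/map
  rw [countLoop_eq_counter l]
  dsimp only
  rw [show (fun (duplicates : List String) (p : Char × Int) =>
        if p.2 > 1 then duplicates ++ [p.1.toString] else duplicates)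
      = (fun duplicates p =>
        if (fun (q : Char × Int) => decide (q.2 > 1)) p = true then
          duplicates ++ [(fun (q : Char × Int) => q.1.toString) p] else duplicates) from by
    funext acc p; simp only [decide_eq_true_eq]]
  rw [PySem.List.foldl_append_if, PySem.Dict.items_counter, List.filter_map, List.map_map]
  -- B side
  rw [phase2_fst]
  simp only [List.nil_append]
  have hded : PySem.List.dedup l = PySem.Set.ofList l := by simp
  rw [hded,
    show ((fun (q : Char × Int) => q.1.toString) ∘ fun k => (k, ((l.count k : Int)))) = (fun c => c.toString) from rfl]
  congr 1
  apply List.filter_congr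
  intro x _
  apply Bool.eq_iff_iff.mpr
  have h2 : PySem.Set.contains PySem.Set.empty x = false := by
    apply Bool.eq_false_iff.mpr
    intro hc
    exact (List.not_mem_nil) ((PySem.Set.contains_iff _ _).mp hc)
  rw [Bool.and_eq_true, PySem.Set.contains_iff,
    phase1_mem l PySem.Set.empty PySem.Set.empty x List.nodup_nil List.nodup_nil, h2]
  simp only [PySem.Set.empty, Function.comp_apply, decide_eq_true_eq, gt_iff_lt, List.not_mem_nil, false_and,
    false_or, Bool.not_false, and_true]
  constructor
  · intro hgt
    have h3 : 1 < l.count x := by exact_mod_cast hgt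
    omega
  · intro hcnt
    have h3 : 1 < l.count x := by omega
    exact_mod_cast h3
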